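-- pv_equiv track=rewrite | github.com/tominny/ai-patient-actor-ondoc | analysis/OnDoc AI Patient Actor Content analysis.py | fix_truncated_json
-- ===== SOURCE A (Python) =====
-- def fix_truncated_json(json_str):
--     """Attempt to fix truncated JSON by balancing brackets."""
--     # Count opening and closing braces/brackets
--     open_braces = json_str.count('{')
--     close_braces = json_str.count('}')
--     open_brackets = json_str.count('[')
--     close_brackets = json_str.count(']')
--
--     # Add missing closing braces/brackets if needed
--     if open_braces > close_braces:
--         json_str += '}' * (open_braces - close_braces)
--     if open_brackets > close_brackets:
--         json_str += ']' * (open_brackets - close_brackets)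
--
--     # Handle truncated string values by trying to find unterminated quotes
--     lines = json_str.split('\n')
--     fixed_lines = []
--
--     for line in lines:
--         if line.count('"') % 2 == 1:  # Odd number of quotes indicates unterminated string
--             line += '"'  # Add closing quote
--         fixed_lines.append(line)
--
--     return '\n'.join(fixed_lines)
-- ===== SOURCE B (Python) =====
-- def fix_truncated_json(json_str):
--     """Attempt to fix truncated JSON by balancing brackets (single-pass rewrite)."""
--     brace = 0      # '{' minus '}'
--     bracket = 0    # '[' minus ']'
--     out = []       # completed, already-fixed lines
--     cur = []       # characters of the current line
--     parity = False # current line has an odd number of '"' so far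
--     for ch in json_str:
--         if ch == '{':
--             brace += 1
--         elif ch == '}':
--             brace -= 1
--         elif ch == '[':
--             bracket += 1
--         elif ch == ']':
--             bracket -= 1
--         elif ch == '"':
--             parity = not parity
--         if ch == '\n':
--             out.append(''.join(cur) + ('"' if parity else ''))
--             cur = []
--             parity = False
--         else:
--             cur.append(ch)
--     last = ''.join(cur)
--     if brace > 0:
--         last += '}' * brace
--     if bracket > 0:
--         last += ']' * bracket
--     if parity:
--         last += '"'
--     out.append(last)
--     return '\n'.join(out)
-- ===== Notes on version B (the rewrite author's own statement) =====
-- stated objective: alternative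
-- what changed: Replaces A's four separate count() scans plus a split/join line loop (several passes over the string) with one fused single pass that simultaneously maintains the brace/bracket balance counters and the current line's quote parity, emitting fixed lines as newlines are met and the closers on the last line.
import Mathlib
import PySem

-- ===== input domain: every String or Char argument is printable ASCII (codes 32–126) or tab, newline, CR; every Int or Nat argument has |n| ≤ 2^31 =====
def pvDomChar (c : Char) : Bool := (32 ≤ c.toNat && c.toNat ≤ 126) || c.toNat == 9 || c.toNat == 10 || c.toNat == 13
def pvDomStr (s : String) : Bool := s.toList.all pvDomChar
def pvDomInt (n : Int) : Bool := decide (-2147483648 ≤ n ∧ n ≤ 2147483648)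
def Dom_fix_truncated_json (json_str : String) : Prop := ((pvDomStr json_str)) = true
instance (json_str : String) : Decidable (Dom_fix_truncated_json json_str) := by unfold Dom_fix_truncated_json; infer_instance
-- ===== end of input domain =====

-- B fuses A's four count() scans and the per-line quote-fix loop into one single pass; same return value.

-- ===== PORT A =====
-- literal port of A: four substring counts, conditional closer appends ('}'*n ported as
-- List.replicate n '}', exact since the guard makes n positive), split on '\n', per-line
-- quote fix via an appending fold, '\n'.join.
def fix_truncated_json (json_str : String) : String :=
  let cs := json_str.toList
  let open_braces := PySem.Chars.count cs ['{']
  let close_braces := PySem.Chars.count cs ['}']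
  let open_brackets := PySem.Chars.count cs ['[']
  let close_brackets := PySem.Chars.count cs [']']
  let cs1 := if open_braces > close_braces then cs ++ List.replicate (open_braces - close_braces) '}' else cs
  let cs2 := if open_brackets > close_brackets then cs1 ++ List.replicate (open_brackets - close_brackets) ']' else cs1
  let lines := PySem.Chars.splitOn cs2 ['\n']
  let fixed_lines := lines.foldl (fun acc line =>
    acc ++ [if PySem.Chars.count line ['"'] % 2 == 1 then line ++ ['"'] else line]) []
  String.mk (PySem.Chars.join ['\n'] fixed_lines)

-- ===== PORT B =====
-- one step of B's single pass: state = (brace, bracket, finished fixed lines, current line, quote parity)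
def bStep (st : Int × Int × List (List Char) × List Char × Bool) (ch : Char) :
    Int × Int × List (List Char) × List Char × Bool :=
  match st with
  | (brace, bracket, out, cur, parity) =>
    let t : Int × Int × Bool :=
      if ch = '{' then (brace + 1, bracket, parity)
      else if ch = '}' then (brace - 1, bracket, parity)
      else if ch = '[' then (brace, bracket + 1, parity)
      else if ch = ']' then (brace, bracket - 1, parity)
      else if ch = '"' then (brace, bracket, !parity)
      else (brace, bracket, parity)
    if ch = '\n' then (t.1, t.2.1, out ++ [cur ++ (if t.2.2 then ['"'] else [])], ([] : List Char), false)
    else (t.1, t.2.1, out, cur ++ [ch], t.2.2)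

def fix_truncated_json_alt (json_str : String) : String :=
  match json_str.toList.foldl bStep (0, 0, [], [], false) with
  | (brace, bracket, out, cur, parity) =>
    let last := cur
    let last := if brace > 0 then last ++ List.replicate brace.toNat '}' else last
    let last := if bracket > 0 then last ++ List.replicate bracket.toNat ']' else last
    let last := if parity then last ++ ['"'] else last
    String.mk (PySem.Chars.join ['\n'] (out ++ [last]))

-- ===== PRECONDITION & SPEC =====
def Spec_fix_truncated_json (json_str : String) (out : String) : Prop := out = fix_truncated_json_alt json_str
instance (json_str : String) (out : String) : Decidable (Spec_fix_truncated_json json_str out) := by unfold Spec_fix_truncated_json; infer_instance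

-- ===== CLAIM (what is proved, stated in full; the proofs are below) =====
def Claim_equal_fix_truncated_json : Prop := ∀ (json_str : String), Dom_fix_truncated_json json_str → Spec_fix_truncated_json json_str (fix_truncated_json json_str)

-- ===== LEMMAS AND PROOFS =====

-- proof-only helpers
-- structural form of PySem.Chars.splitOn cs ['\n']
def mySplit : List Char → List (List Char)
  | [] => [[]]
  | c :: rest => if c = '\n' then [] :: mySplit rest else (mySplit rest).modifyHead (c :: ·)

-- A's per-line quote fix
def fixFn (line : List Char) : List Char :=
  if line.count '"' % 2 == 1 then line ++ ['"'] else line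

-- spec of the line-building part of B's pass
def lines3 : List Char → List Char → Bool → (List (List Char) × List Char × Bool)
  | [], cur, p => ([], cur, p)
  | c :: rest, cur, p =>
    let p' := if c = '"' then !p else p
    if c = '\n' then
      let r := lines3 rest [] false
      ((cur ++ if p' then ['"'] else []) :: r.1, r.2)
    else lines3 rest (cur ++ [c]) p'

lemma count_go_single (v : Char) : ∀ (l : List Char) (fuel acc : Nat), l.length ≤ fuel →
    PySem.Chars.count.go [v] fuel l acc = acc + l.count v := by
  intro l
  induction l with
  | nil => intro fuel acc h; cases fuel <;> simp [PySem.Chars.count.go]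
  | cons c t ih =>
    intro fuel acc h
    cases fuel with
    | zero => simp at h
    | succ f =>
      have h' : t.length ≤ f := by simpa using h
      simp only [PySem.Chars.count.go]
      by_cases hv : v = c
      · subst hv
        rw [if_pos (by simp)]
        simp [ih f (acc + 1) h']
        omega
      · rw [if_neg (by simp [List.isPrefixOf, hv])]
        simp [ih f acc h', Ne.symm hv]

lemma count_single (cs : List Char) (v : Char) : PySem.Chars.count cs [v] = cs.count v := by
  simp [PySem.Chars.count, count_go_single v cs cs.length 0 le_rfl]

lemma mySplit_ne_nil (l : List Char) : mySplit l ≠ [] := by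
  induction l with
  | nil => simp [mySplit]
  | cons c rest ih =>
    simp only [mySplit]
    split
    · simp
    · cases h : mySplit rest with
      | nil => exact absurd h ih
      | cons a b => simp [List.modifyHead]

lemma splitOn_go_nl : ∀ (l : List Char) (fuel : Nat) (cur : List Char) (acc : List (List Char)),
    l.length < fuel →
    PySem.Chars.splitOn.go ['\n'] fuel l cur acc = acc.reverse ++ (mySplit l).modifyHead (cur.reverse ++ ·) := by
  intro l
  induction l with
  | nil => intro fuel cur acc h; cases fuel with
    | zero => omega
    | succ f => simp [PySem.Chars.splitOn.go, mySplit]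
  | cons c t ih =>
    intro fuel cur acc h
    cases fuel with
    | zero => omega
    | succ f =>
      have h' : t.length < f := by simpa using h
      simp only [PySem.Chars.splitOn.go]
      by_cases hc : c = '\n'
      · subst hc
        rw [if_pos (by simp [List.isPrefixOf])]
        simp only [List.length_cons, List.drop_succ_cons, List.length_nil, List.drop_zero]
        rw [ih f [] ((cur.reverse) :: acc) h']
        simp [mySplit, List.modifyHead]
        cases mySplit t <;> rfl
      · rw [if_neg (by simp [List.isPrefixOf]; exact fun e => hc e.symm)]
        rw [ih f (c :: cur) acc h']
        simp [mySplit, hc]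
        cases hm : mySplit t with
        | nil => exact absurd hm (mySplit_ne_nil t)
        | cons a b => simp [List.modifyHead]

lemma splitOn_nl (cs : List Char) : PySem.Chars.splitOn cs ['\n'] = mySplit cs := by
  rw [PySem.Chars.splitOn, splitOn_go_nl cs (cs.length + 1) [] [] (by omega)]
  cases hm : mySplit cs with
  | nil => exact absurd hm (mySplit_ne_nil cs)
  | cons a b => simp [List.modifyHead]

lemma mySplit_no_nl (l : List Char) (h : '\n' ∉ l) : mySplit l = [l] := by
  induction l with
  | nil => simp [mySplit]
  | cons c rest ih =>
    have hc : ¬ c = '\n' := fun e => h (by simp [e])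
    simp [mySplit, hc, ih (fun hm => h (by simp [hm])), List.modifyHead]

lemma mySplit_append_nl (cur rest : List Char) (h : '\n' ∉ cur) :
    mySplit (cur ++ '\n' :: rest) = cur :: mySplit rest := by
  induction cur with
  | nil => simp [mySplit]
  | cons c t ih =>
    have hc : ¬ c = '\n' := fun e => h (by simp [e])
    simp [mySplit, hc, ih (fun hm => h (by simp [hm])), List.modifyHead]

lemma foldl_bStep (cs : List Char) : ∀ (b k : Int) (out : List (List Char)) (cur : List Char) (p : Bool),
    cs.foldl bStep (b, k, out, cur, p) =
      (b + ((cs.count '{' : Int) - cs.count '}'), k + ((cs.count '[' : Int) - cs.count ']'),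
       out ++ (lines3 cs cur p).1, (lines3 cs cur p).2) := by
  induction cs with
  | nil => intro b k out cur p; simp [lines3]
  | cons c rest ih =>
    intro b k out cur p
    simp only [List.foldl_cons, List.count_cons]
    by_cases h1 : c = '{' <;> by_cases h2 : c = '}' <;> by_cases h3 : c = '[' <;>
      by_cases h4 : c = ']' <;> by_cases h5 : c = '"' <;> by_cases h6 : c = '\n' <;>
      subst_vars <;> simp [bStep, lines3, *] <;>
      try omega

lemma lines3_append (xs ys : List Char) : ∀ (cur : List Char) (p : Bool),
    lines3 (xs ++ ys) cur p =
      ((lines3 xs cur p).1 ++ (lines3 ys (lines3 xs cur p).2.1 (lines3 xs cur p).2.2).1,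
       (lines3 ys (lines3 xs cur p).2.1 (lines3 xs cur p).2.2).2) := by
  induction xs with
  | nil => intro cur p; simp [lines3]
  | cons c rest ih =>
    intro cur p
    by_cases hc : c = '\n' <;> simp [lines3, hc, ih]

lemma lines3_plain (t : List Char) (h : ∀ c ∈ t, c ≠ '\n' ∧ c ≠ '"') :
    ∀ (cur : List Char) (p : Bool), lines3 t cur p = ([], cur ++ t, p) := by
  induction t with
  | nil => intro cur p; simp [lines3]
  | cons c rest ih =>
    intro cur p
    have hc := h c (by simp)
    rw [lines3]
    simp only [hc.1, hc.2, if_false]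
    rw [ih (fun x hx => h x (by simp [hx])) (cur ++ [c]) p]
    simp

lemma lines3_spec (cs : List Char) : ∀ (cur : List Char) (p : Bool), '\n' ∉ cur →
    p = decide (cur.count '"' % 2 = 1) →
    (lines3 cs cur p).1 = ((mySplit (cur ++ cs)).dropLast).map fixFn ∧
    (lines3 cs cur p).2.1 = (mySplit (cur ++ cs)).getLastD [] ∧
    (lines3 cs cur p).2.2 = decide (((lines3 cs cur p).2.1).count '"' % 2 = 1) := by
  induction cs with
  | nil =>
    intro cur p hnl hp
    simp [lines3, mySplit_no_nl cur hnl, hp]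
  | cons c rest ih =>
    intro cur p hnl hp
    by_cases hc : c = '\n'
    · subst hc
      have h1 := ih [] false (by simp) (by simp)
      simp only [List.nil_append] at h1
      rw [lines3]
      simp only [if_neg (by decide : ¬ ('\n' = '"'))]
      rw [mySplit_append_nl cur rest hnl]
      cases hm : mySplit rest with
      | nil => exact absurd hm (mySplit_ne_nil rest)
      | cons a b =>
        rw [hm] at h1
        refine ⟨?_, by simpa using h1.2.1, by simpa using h1.2.2⟩
        simp only [List.dropLast_cons_of_ne_nil (by simp : (a :: b) ≠ []), List.map_cons]
        simp [fixFn, hp, h1.1]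
        split <;> simp
    · have hp' : (if c = '"' then !p else p) = decide ((cur ++ [c]).count '"' % 2 = 1) := by
        by_cases hq : c = '"' <;>
          by_cases h2 : List.count '"' cur % 2 = 1 <;>
            simp [hq, hp, h2, List.count_append] <;> omega
      have h1 := ih (cur ++ [c]) _ (by simp [hnl]; exact fun e => hc e.symm) hp'
      rw [lines3]
      simp only [if_neg hc]
      rw [List.append_cons cur c rest]
      exact h1

lemma fixFn_eq (x : List Char) : fixFn x = x ++ (if x.count '"' % 2 == 1 then ['"'] else []) := by
  rw [fixFn]; split <;> simp

lemma map_fixFn_split (M : List (List Char)) (h : M ≠ []) :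
    M.map fixFn = (M.dropLast).map fixFn ++ [fixFn (M.getLastD [])] := by
  induction M using List.reverseRecOn with
  | nil => exact absurd rfl h
  | append_singleton ys y ih => simp

lemma core (cs t : List Char) (ht : ∀ x ∈ t, x ≠ '\n' ∧ x ≠ '"') :
    (mySplit (cs ++ t)).map fixFn =
      (lines3 cs [] false).1 ++
        [if (lines3 cs [] false).2.2 then ((lines3 cs [] false).2.1 ++ t) ++ ['"']
         else (lines3 cs [] false).2.1 ++ t] := by
  have h := lines3_spec (cs ++ t) [] false (by simp) (by simp)
  rw [lines3_append cs t [] false,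
      lines3_plain t ht (lines3 cs [] false).2.1 (lines3 cs [] false).2.2] at h
  simp only [List.append_nil, List.nil_append] at h
  rw [map_fixFn_split _ (mySplit_ne_nil _), ← h.1, ← h.2.1]
  congr 1
  rw [fixFn_eq]
  have h3 : (lines3 cs [] false).2.2
      = decide (((lines3 cs [] false).2.1 ++ t).count '"' % 2 = 1) := by simpa using h.2.2
  rw [h3]
  split <;> split <;> simp_all

-- ===== VERDICT (by name: the statement is the Claim_ definition above) =====
theorem fix_truncated_json_spec : Claim_equal_fix_truncated_json := by
  intro json_str _h
  unfold Spec_fix_truncated_json fix_truncated_json fix_truncated_json_alt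
  simp only [count_single, splitOn_nl, foldl_bStep, PySem.List.foldl_append_singleton_eq_map,
    zero_add, List.nil_append]
  have hfix : (fun x => if (List.count '"' x % 2 == 1) = true then x ++ ['"'] else x) = fixFn := rfl
  rw [hfix]
  generalize json_str.toList = cs
  have hrep : ∀ (n : Nat) (ch : Char), ch ≠ '\n' → ch ≠ '"' →
      ∀ x ∈ List.replicate n ch, x ≠ '\n' ∧ x ≠ '"' := by
    intro n ch h1 h2 x hx
    rw [List.eq_of_mem_replicate hx]; exact ⟨h1, h2⟩
  by_cases hbr : List.count '{' cs > List.count '}' cs <;>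
    by_cases hbk : List.count '[' cs > List.count ']' cs
  · have e1 : ((List.count '{' cs : Int) - List.count '}' cs) > 0 := by omega
    have e2 : ((List.count '[' cs : Int) - List.count ']' cs) > 0 := by omega
    have t1 : ((List.count '{' cs : Int) - List.count '}' cs).toNat
        = List.count '{' cs - List.count '}' cs := by omega
    have t2 : ((List.count '[' cs : Int) - List.count ']' cs).toNat
        = List.count '[' cs - List.count ']' cs := by omega
    rw [if_pos hbk, if_pos hbr, if_pos e1, if_pos e2, t1, t2, List.append_assoc]
    rw [core cs _ (by
      intro x hx
      rcases List.mem_append.1 hx with hx | hx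
      · exact hrep _ '}' (by decide) (by decide) x hx
      · exact hrep _ ']' (by decide) (by decide) x hx)]
    simp [List.append_assoc]
  · have e1 : ((List.count '{' cs : Int) - List.count '}' cs) > 0 := by omega
    have e2 : ¬ ((List.count '[' cs : Int) - List.count ']' cs) > 0 := by omega
    have t1 : ((List.count '{' cs : Int) - List.count '}' cs).toNat
        = List.count '{' cs - List.count '}' cs := by omega
    rw [if_neg hbk, if_pos hbr, if_pos e1, if_neg e2, t1]
    rw [core cs _ (hrep _ '}' (by decide) (by decide))]
  · have e1 : ¬ ((List.count '{' cs : Int) - List.count '}' cs) > 0 := by omega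
    have e2 : ((List.count '[' cs : Int) - List.count ']' cs) > 0 := by omega
    have t2 : ((List.count '[' cs : Int) - List.count ']' cs).toNat
        = List.count '[' cs - List.count ']' cs := by omega
    rw [if_pos hbk, if_neg hbr, if_neg e1, if_pos e2, t2]
    rw [core cs _ (hrep _ ']' (by decide) (by decide))]
  · have e1 : ¬ ((List.count '{' cs : Int) - List.count '}' cs) > 0 := by omega
    have e2 : ¬ ((List.count '[' cs : Int) - List.count ']' cs) > 0 := by omega
    rw [if_neg hbk, if_neg hbr, if_neg e1, if_neg e2]
    have := core cs [] (by simp)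
    simp only [List.append_nil] at this
    rw [this]
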